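-- pv_equiv track=rewrite | github.com/musumadaan/Execution_agent | workelate_system/app/agent/executor.py | _duplicate_headers
-- ===== SOURCE A (Python) =====
-- def _duplicate_headers(text: str) -> bool:
--     lines = (text or "").splitlines()
--     headers = [ln.strip() for ln in lines if ln.strip().startswith("## ")]
--     seen = set()
--     for h in headers:
--         if h in seen:
--             return True
--         seen.add(h)
--     return False
-- ===== SOURCE B (Python) =====
-- def _duplicate_headers(text: str) -> bool:
--     lines = (text or "").splitlines()
--     headers = sorted(ln.strip() for ln in lines if ln.strip().startswith("## "))
--     return any(a == b for a, b in zip(headers, headers[1:]))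
-- ===== Notes on version B (the rewrite author's own statement) =====
-- stated objective: alternative
-- what changed: Instead of a seen-set loop with early return, B sorts the extracted headers and reports a duplicate iff some adjacent pair of the sorted list is equal (sort-then-adjacent-scan, no set at all).
import Mathlib
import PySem

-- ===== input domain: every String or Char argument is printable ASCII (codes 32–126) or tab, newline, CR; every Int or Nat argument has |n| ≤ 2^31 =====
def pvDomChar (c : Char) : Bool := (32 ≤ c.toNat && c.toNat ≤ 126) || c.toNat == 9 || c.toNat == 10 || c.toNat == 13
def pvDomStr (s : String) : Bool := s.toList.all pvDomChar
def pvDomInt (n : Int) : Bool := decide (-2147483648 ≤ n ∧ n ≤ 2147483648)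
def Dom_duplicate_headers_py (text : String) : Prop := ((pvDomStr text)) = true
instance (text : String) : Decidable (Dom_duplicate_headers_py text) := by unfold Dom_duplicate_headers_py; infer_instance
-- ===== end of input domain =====

-- B replaces A's seen-set loop by sorting the headers and scanning adjacent pairs (alternative algorithm, no set).

-- ===== PORT A =====
-- the 'for h in headers' loop with the 'seen' set and early return
def dupLoopA (seen : PySem.Set String) : List String → Bool
  | [] => false
  | h :: t => if PySem.Set.contains seen h then true else dupLoopA (PySem.Set.add seen h) t

def duplicate_headers_py (text : String) : Bool :=
  let lines := PySem.Str.splitlines (if text == "" then "" else text)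
  let headers := (lines.filter (fun ln => PySem.Str.startswith (PySem.Str.strip ln) "## ")).map
      (fun ln => PySem.Str.strip ln)
  dupLoopA PySem.Set.empty headers

-- ===== PORT B =====
def duplicate_headers_py_alt (text : String) : Bool :=
  let lines := PySem.Str.splitlines (if text == "" then "" else text)
  let headers := PySem.List.sorted
      ((lines.filter (fun ln => PySem.Str.startswith (PySem.Str.strip ln) "## ")).map
        (fun ln => PySem.Str.strip ln)) (fun x => x) false
  (headers.zip (PySem.List.slice headers (some 1) none)).any (fun p => p.1 == p.2)

-- ===== PRECONDITION & SPEC =====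
def Spec_duplicate_headers_py (text : String) (out : Bool) : Prop := out = duplicate_headers_py_alt text
instance (text : String) (out : Bool) : Decidable (Spec_duplicate_headers_py text out) := by unfold Spec_duplicate_headers_py; infer_instance

-- ===== CLAIM (what is proved, stated in full; the proofs are below) =====
def Claim_equal_duplicate_headers_py : Prop := ∀ (text : String), Dom_duplicate_headers_py text → Spec_duplicate_headers_py text (duplicate_headers_py text)

-- ===== LEMMAS AND PROOFS =====

-- A's loop returns true iff the list has a duplicate or already meets the seen set
theorem dupLoopA_eq_not_nodup (hs : List String) (seen : PySem.Set String) :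
    dupLoopA seen hs = !decide (hs.Nodup ∧ ∀ x ∈ hs, x ∉ seen) := by
  induction hs generalizing seen with
  | nil => simp [dupLoopA]
  | cons h t ih =>
    simp only [dupLoopA]
    by_cases hm : h ∈ seen
    · have hc : PySem.Set.contains seen h = true := by
        simp [PySem.Set.contains, hm]
      rw [if_pos hc]
      simp only [Bool.true_eq, Bool.not_eq_true', decide_eq_false_iff_not]
      rintro ⟨-, hall⟩; exact hall h (by simp) hm
    · have hc : PySem.Set.contains seen h = false := by
        simp [PySem.Set.contains, hm]
      rw [if_neg (by simp only [hc]; exact Bool.false_ne_true), ih (PySem.Set.add seen h)]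
      have hiff : (t.Nodup ∧ ∀ x ∈ t, x ∉ PySem.Set.add seen h) ↔
          ((h :: t).Nodup ∧ ∀ x ∈ h :: t, x ∉ seen) := by
        constructor
        · rintro ⟨hnd, hall⟩
          refine ⟨List.nodup_cons.mpr ⟨fun hht => ?_, hnd⟩, ?_⟩
          · exact (hall h hht) (by simp [PySem.Set.mem_add])
          · intro x hx
            rcases List.mem_cons.mp hx with rfl | hxt
            · exact hm
            · intro hxs; exact hall x hxt (by simp [PySem.Set.mem_add, hxs])
        · rintro ⟨hnd, hall⟩
          rcases List.nodup_cons.mp hnd with ⟨hht, hndt⟩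
          refine ⟨hndt, fun x hx hxadd => ?_⟩
          rcases (PySem.Set.mem_add _ _ _).mp hxadd with hxs | rfl
          · exact hall x (by simp [hx]) hxs
          · exact hht hx
      rw [decide_eq_decide.mpr hiff]

-- adjacent-equal scan over zip ys (drop 1 ys)
theorem zip_any_adj (ys : List String) :
    (ys.zip (ys.drop 1)).any (fun p => p.1 == p.2) =
      match ys with
      | a :: b :: t => (a == b) || ((b :: t).zip (t)).any (fun p => p.1 == p.2)
      | _ => false := by
  match ys with
  | [] => simp
  | [a] => simp
  | a :: b :: t => simp [List.zip]

-- on a ≤-sorted list, some adjacent pair is equal iff the list is not Nodup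
theorem adj_eq_not_nodup (ys : List String) (hp : ys.Pairwise (· ≤ ·)) :
    (ys.zip (ys.drop 1)).any (fun p => p.1 == p.2) = !decide ys.Nodup := by
  induction ys with
  | nil => simp
  | cons a t ih =>
    match t with
    | [] => simp
    | b :: t' =>
      rcases List.pairwise_cons.mp hp with ⟨hale, hpt⟩
      have ihv := ih hpt
      rw [zip_any_adj]
      simp only []
      rw [show (b :: t').drop 1 = t' from rfl] at ihv
      rw [ihv]
      by_cases hab : a = b
      · subst hab
        have : ¬(a :: a :: t').Nodup := by simp
        simp [this]
      · have hiff : (a :: b :: t').Nodup ↔ (b :: t').Nodup := by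
          constructor
          · exact fun h => (List.nodup_cons.mp h).2
          · intro h
            refine List.nodup_cons.mpr ⟨?_, h⟩
            intro hmem
            rcases List.mem_cons.mp hmem with rfl | hat
            · exact hab rfl
            · -- a ∈ t': a ≤ b (adjacent) and b ≤ a (pairwise of b :: t'), so a = b
              have hba : b ≤ a := (List.pairwise_cons.mp hpt).1 a hat
              have hab' : a ≤ b := hale b (by simp)
              exact hab (le_antisymm hab' hba)
        have : (a == b) = false := by simp [hab]
        rw [this, Bool.false_or, decide_eq_decide.mpr hiff]

-- ===== VERDICT (by name: the statement is the Claim_ definition above) =====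
theorem duplicate_headers_py_spec : Claim_equal_duplicate_headers_py := by
  intro text _
  unfold Spec_duplicate_headers_py duplicate_headers_py duplicate_headers_py_alt
  simp only []
  set hs := ((PySem.Str.splitlines (if text == "" then "" else text)).filter
      (fun ln => PySem.Str.startswith (PySem.Str.strip ln) "## ")).map
      (fun ln => PySem.Str.strip ln) with hhs
  set ys := PySem.List.sorted hs (fun x => x) false with hys
  have hperm : ys.Perm hs := PySem.List.sorted_perm hs (fun x => x) false
  have hpair : ys.Pairwise (· ≤ ·) := by
    have := PySem.List.sorted_pairwise hs (fun x => x)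
    simpa using this
  have hslice : PySem.List.slice ys (some 1) none = ys.drop 1 := by
    have := PySem.List.slice_from_natCast ys 1
    simpa using this
  rw [hslice, dupLoopA_eq_not_nodup, adj_eq_not_nodup ys hpair]
  have : ∀ x ∈ hs, x ∉ (PySem.Set.empty : PySem.Set String) := by
    intro x _; simp [PySem.Set.empty]
  rw [decide_eq_decide.mpr (show (hs.Nodup ∧ ∀ x ∈ hs, x ∉ (PySem.Set.empty : PySem.Set String)) ↔ ys.Nodup from ⟨fun ⟨h, _⟩ => hperm.nodup_iff.mpr h, fun h => ⟨hperm.nodup_iff.mp h, this⟩⟩)]
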